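-- pv_equiv track=rewrite | github.com/monarch-initiative/monarch-app | backend/src/monarch_py/api/utils/get_text_annotations.py | concatenate_ngram_entities
-- ===== SOURCE A (Python) =====
-- def concatenate_ngram_entities(lst):
--     merged_list = []
--     start, end, text = lst[0]
--     for element in lst[1:]:
--         if element[0] <= end:  # Check if range overlaps
--             end = max(end, element[1])  # Merge the range
--             text += "|" + element[2]  # Concatenate the texts
--         else:
--             merged_list.append([start, end, text])  # Add the merged element to the result
--             start, end, text = element  # Move to the next element
--     merged_list.append([start, end, text])  # Add the last merged element
--     return merged_list
-- ===== SOURCE B (Python) =====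
-- def concatenate_ngram_entities(lst):
--     # Group the list into maximal overlapping runs, then aggregate each run:
--     # collect a run's texts in a list and join them once with "|".
--     merged = []
--     rest = lst
--     while rest:
--         s, e, t = rest[0]
--         texts = [t]
--         i = 1
--         while i < len(rest) and rest[i][0] <= e:
--             e = max(e, rest[i][1])
--             texts.append(rest[i][2])
--             i += 1
--         merged.append([s, e, "|".join(texts)])
--         rest = rest[i:]
--     return merged
-- ===== Notes on version B (the rewrite author's own statement) =====
-- stated objective: alternative
-- what changed: B restructures the single running-accumulator merge into a two-level group-then-aggregate pass: an outer loop peels off each maximal overlapping run from the remaining list via an inner scan, collects the run's texts in a list and joins them once with '|'; Pre_ excludes only the empty list, on which A raises IndexError (B returns []).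
import Mathlib
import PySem

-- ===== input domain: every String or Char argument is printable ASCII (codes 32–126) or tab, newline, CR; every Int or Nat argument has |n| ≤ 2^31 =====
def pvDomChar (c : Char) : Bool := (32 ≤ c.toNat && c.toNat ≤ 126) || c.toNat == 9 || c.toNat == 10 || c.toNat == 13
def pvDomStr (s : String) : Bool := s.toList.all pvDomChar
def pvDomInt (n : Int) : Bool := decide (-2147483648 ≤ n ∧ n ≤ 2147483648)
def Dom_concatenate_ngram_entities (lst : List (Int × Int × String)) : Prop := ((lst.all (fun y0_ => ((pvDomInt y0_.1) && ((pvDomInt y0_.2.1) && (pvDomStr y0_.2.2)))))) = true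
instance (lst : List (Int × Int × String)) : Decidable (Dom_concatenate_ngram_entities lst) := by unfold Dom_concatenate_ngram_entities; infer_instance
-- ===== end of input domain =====

-- B replaces A's single running-accumulator pass by a two-level group-then-aggregate
-- scheme: peel off each maximal overlapping run, then join that run's texts once with
-- "|" (objective: alternative). Pre_ excludes only the empty list, where A raises IndexError.

-- ===== PORT A =====
-- A unpacks lst[0] (IndexError on []), folds over lst[1:] with running state
-- (merged_list, start, end, text), and appends the pending triple after the loop.
def concatenate_ngram_entities (lst : List (Int × Int × String)) :
    List (Int × Int × String) :=
  match lst with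
  | [] => []   -- Python raises IndexError here; excluded by Pre_
  | (s0, e0, t0) :: rest =>
    let st := rest.foldl
      (fun (acc : List (Int × Int × String) × Int × Int × String) el =>
        let (ml, s, e, t) := acc
        if el.1 ≤ e then
          (ml, s, max e el.2.1, t ++ "|" ++ el.2.2)
        else
          (ml ++ [(s, e, t)], el.1, el.2.1, el.2.2))
      ([], s0, e0, t0)
    st.1 ++ [(st.2.1, st.2.2.1, st.2.2.2)]

-- ===== PORT B =====
-- Source B's inner while loop: scan the elements overlapping the running end e,
-- returning the final end, the collected texts, and the unconsumed remainder.
def cneScan (e : Int) : List (Int × Int × String) →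
    Int × List String × List (Int × Int × String)
  | [] => (e, [], [])
  | (a, b, c) :: rs =>
    if a ≤ e then
      let r := cneScan (max e b) rs
      (r.1, c :: r.2.1, r.2.2)
    else (e, [], (a, b, c) :: rs)

-- Source B's "|".join
def cneJoin : List String → String
  | [] => ""
  | [x] => x
  | x :: xs => x ++ "|" ++ cneJoin xs

theorem cneScan_len (e : Int) (l : List (Int × Int × String)) :
    (cneScan e l).2.2.length ≤ l.length := by
  induction l generalizing e with
  | nil => simp [cneScan]
  | cons hd tl ih =>
    obtain ⟨a, b, c⟩ := hd
    simp only [cneScan]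
    split
    · exact le_trans (ih (max e b)) (Nat.le_succ _)
    · simp

-- Source B's outer while loop: take a run's head, scan its overlapping tail,
-- emit one merged triple, recurse on the remainder.
def cneMerge : List (Int × Int × String) → List (Int × Int × String)
  | [] => []
  | (s, e, t) :: rest =>
    let r := cneScan e rest
    (s, r.1, cneJoin (t :: r.2.1)) :: cneMerge r.2.2
termination_by l => l.length
decreasing_by
  simpa using Nat.lt_succ_of_le (cneScan_len e rest)

def concatenate_ngram_entities_alt (lst : List (Int × Int × String)) :
    List (Int × Int × String) := cneMerge lst

-- ===== PRECONDITION & SPEC =====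
-- A raises IndexError on the empty list (it unpacks lst[0]); Pre_ excludes exactly that.
def Pre_concatenate_ngram_entities (lst : List (Int × Int × String)) : Prop := lst ≠ []
instance (lst : List (Int × Int × String)) : Decidable (Pre_concatenate_ngram_entities lst) := by unfold Pre_concatenate_ngram_entities; infer_instance
def pvWitness_concatenate_ngram_entities : (List (Int × Int × String)) :=
  [(1, 4, "ab"), (3, 6, "cd"), (9, 10, "e")]

def Spec_concatenate_ngram_entities (lst : List (Int × Int × String)) (out : List (Int × Int × String)) : Prop := out = concatenate_ngram_entities_alt lst
instance (lst : List (Int × Int × String)) (out : List (Int × Int × String)) : Decidable (Spec_concatenate_ngram_entities lst out) := by unfold Spec_concatenate_ngram_entities; infer_instance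

-- ===== CLAIM =====
def Claim_equal_concatenate_ngram_entities : Prop := ∀ (lst : List (Int × Int × String)), Dom_concatenate_ngram_entities lst → Pre_concatenate_ngram_entities lst → Spec_concatenate_ngram_entities lst (concatenate_ngram_entities lst)

-- ===== LEMMAS AND PROOFS =====

-- Key invariant: running A's fold from state (ml, s, e, t) over rest, then appending
-- the pending triple, equals ml followed by the run B's scan extracts from rest
-- (joined texts) and cneMerge of the remainder.
theorem cne_fold_scan (rest : List (Int × Int × String))
    (ml : List (Int × Int × String)) (s e : Int) (t : String) :
    ((rest.foldl
        (fun (acc : List (Int × Int × String) × Int × Int × String) el =>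
          let (ml, s, e, t) := acc
          if el.1 ≤ e then
            (ml, s, max e el.2.1, t ++ "|" ++ el.2.2)
          else
            (ml ++ [(s, e, t)], el.1, el.2.1, el.2.2))
        (ml, s, e, t)).1
      ++ [((rest.foldl
        (fun (acc : List (Int × Int × String) × Int × Int × String) el =>
          let (ml, s, e, t) := acc
          if el.1 ≤ e then
            (ml, s, max e el.2.1, t ++ "|" ++ el.2.2)
          else
            (ml ++ [(s, e, t)], el.1, el.2.1, el.2.2))
        (ml, s, e, t)).2.1,
        (rest.foldl
        (fun (acc : List (Int × Int × String) × Int × Int × String) el =>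
          let (ml, s, e, t) := acc
          if el.1 ≤ e then
            (ml, s, max e el.2.1, t ++ "|" ++ el.2.2)
          else
            (ml ++ [(s, e, t)], el.1, el.2.1, el.2.2))
        (ml, s, e, t)).2.2.1,
        (rest.foldl
        (fun (acc : List (Int × Int × String) × Int × Int × String) el =>
          let (ml, s, e, t) := acc
          if el.1 ≤ e then
            (ml, s, max e el.2.1, t ++ "|" ++ el.2.2)
          else
            (ml ++ [(s, e, t)], el.1, el.2.1, el.2.2))
        (ml, s, e, t)).2.2.2)])
    = ml ++ ((s, (cneScan e rest).1, cneJoin (t :: (cneScan e rest).2.1))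
              :: cneMerge (cneScan e rest).2.2) := by
  induction rest generalizing ml s e t with
  | nil => simp [cneScan, cneJoin, cneMerge]
  | cons el rs ih =>
    obtain ⟨a, b, c⟩ := el
    simp only [List.foldl_cons, cneScan]
    by_cases h : a ≤ e
    · simp only [if_pos h]
      have := ih ml s (max e b) (t ++ "|" ++ c)
      simp only [this]
      congr 2
      cases hs : (cneScan (max e b) rs).2.1 with
      | nil => simp [cneJoin]
      | cons x xs => simp [cneJoin, String.append_assoc]
    · simp only [if_neg h]
      have := ih (ml ++ [(s, e, t)]) a b c
      simp only [this]
      simp [cneMerge, cneJoin]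

-- ===== VERDICT =====
theorem concatenate_ngram_entities_spec : Claim_equal_concatenate_ngram_entities := by
  intro lst _ hpre
  unfold Spec_concatenate_ngram_entities
  match lst with
  | [] => exact absurd rfl hpre
  | (s0, e0, t0) :: rest =>
    have := cne_fold_scan rest [] s0 e0 t0
    simpa [concatenate_ngram_entities, concatenate_ngram_entities_alt, cneMerge]
      using this
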